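-- pv_equiv track=rewrite | github.com/Bryantad/Sona | sona/ai/cognitive_assistant.py | _count_nested_blocks
-- ===== SOURCE A (Python) =====
-- def _count_nested_blocks(code: str) -> int:
--     """Count nested code blocks"""
--     lines = code.split('\n')
--     max_nesting = 0
--     current_nesting = 0
--
--     for line in lines:
--         stripped = line.strip()
--         if stripped.endswith('{'):
--             current_nesting += 1
--             max_nesting = max(max_nesting, current_nesting)
--         elif stripped == '}':
--             current_nesting = max(0, current_nesting - 1)
--
--     return max_nesting
-- ===== SOURCE B (Python) =====
-- def _line_delta(line: str) -> int:
--     s = line.strip()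
--     if s.endswith('{'):
--         return 1
--     if s == '}':
--         return -1
--     return 0
--
--
-- def _count_nested_blocks(code: str) -> int:
--     deltas = [_line_delta(line) for line in code.split('\n')]
--     current = 0
--     peak = 0
--     for d in deltas:
--         current = max(0, current + d)
--         peak = max(peak, current)
--     return peak
-- ===== Notes on version B (the rewrite author's own statement) =====
-- stated objective: alternative
-- what changed: B first maps every line to an integer delta (+1/-1/0) and then folds the delta list with a uniformly clamped running depth whose peak is taken at every step, instead of A's single loop that mutates two counters with per-branch updates.
import Mathlib
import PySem

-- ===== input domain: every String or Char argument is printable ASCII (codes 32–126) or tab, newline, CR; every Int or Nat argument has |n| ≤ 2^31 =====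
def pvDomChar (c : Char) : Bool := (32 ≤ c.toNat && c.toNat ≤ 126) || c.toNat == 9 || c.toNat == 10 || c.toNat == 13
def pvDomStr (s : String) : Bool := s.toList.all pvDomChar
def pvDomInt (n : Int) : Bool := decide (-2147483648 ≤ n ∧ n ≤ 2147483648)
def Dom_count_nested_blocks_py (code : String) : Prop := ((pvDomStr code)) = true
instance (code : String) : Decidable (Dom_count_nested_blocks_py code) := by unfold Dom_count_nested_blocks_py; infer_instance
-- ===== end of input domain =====

-- B maps each line to a +1/-1/0 delta and folds the delta list with a clamped running depth
-- whose peak is tracked at every step; same O(n) cost as A, different decomposition.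


-- ===== PORT A =====
-- code.split('\n'): sep "\n" is nonempty, so PySem.Str.split? returns some; .getD [] is exact here
-- one loop, state (max_nesting, current_nesting), per-branch updates
def pvAStep (st : Int × Int) (line : String) : Int × Int :=
  let stripped := PySem.Str.strip line
  if PySem.Str.endswith stripped "{" then (max st.1 (st.2 + 1), st.2 + 1)
  else if stripped = "}" then (st.1, max 0 (st.2 - 1))
  else st

def count_nested_blocks_py (code : String) : Int :=
  (((PySem.Str.split? code "\n").getD []).foldl pvAStep ((0 : Int), (0 : Int))).1

-- ===== PORT B =====
def pvLineDelta (line : String) : Int :=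
  let s := PySem.Str.strip line
  if PySem.Str.endswith s "{" then 1
  else if s = "}" then -1
  else 0

-- state (current, peak): clamp then take the peak, uniformly on every delta
def pvBStep (st : Int × Int) (d : Int) : Int × Int :=
  let c := max 0 (st.1 + d)
  (c, max st.2 c)

def count_nested_blocks_py_alt (code : String) : Int :=
  ((((PySem.Str.split? code "\n").getD []).map pvLineDelta).foldl pvBStep ((0 : Int), (0 : Int))).2

-- ===== PRECONDITION & SPEC =====
def Spec_count_nested_blocks_py (code : String) (out : Int) : Prop := out = count_nested_blocks_py_alt code
instance (code : String) (out : Int) : Decidable (Spec_count_nested_blocks_py code out) := by unfold Spec_count_nested_blocks_py; infer_instance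

-- ===== CLAIM (what is proved, stated in full; the proofs are below) =====
def Claim_equal_count_nested_blocks_py : Prop := ∀ (code : String), Dom_count_nested_blocks_py code → Spec_count_nested_blocks_py code (count_nested_blocks_py code)

-- ===== LEMMAS AND PROOFS =====
-- Invariant 0 ≤ cur ≤ mx relates the two folds over the same line list.
theorem pv_fold_eq (lines : List String) (mx cur : Int)
    (h0 : 0 ≤ cur) (h1 : cur ≤ mx) :
    (lines.foldl pvAStep (mx, cur)).1
      = ((lines.map pvLineDelta).foldl pvBStep (cur, mx)).2 := by
  induction lines generalizing mx cur with
  | nil => simp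
  | cons l t ih =>
    simp only [List.map_cons, List.foldl_cons, pvAStep, pvBStep, pvLineDelta]
    split_ifs with hb hc
    · have : max 0 (cur + 1) = cur + 1 := by omega
      rw [this]
      exact ih (max mx (cur + 1)) (cur + 1) (by omega) (by omega)
    · have e : cur + -1 = cur - 1 := by ring
      rw [e, show max mx (max 0 (cur - 1)) = mx by omega]
      exact ih mx (max 0 (cur - 1)) (by omega) (by omega)
    · rw [show cur + 0 = cur by ring, show max 0 cur = cur by omega,
          show max mx cur = mx by omega]
      exact ih mx cur h0 h1

-- ===== VERDICT (by name: the statement is the Claim_ definition above) =====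
theorem count_nested_blocks_py_spec : Claim_equal_count_nested_blocks_py := by
  intro code _
  unfold Spec_count_nested_blocks_py count_nested_blocks_py count_nested_blocks_py_alt
  exact pv_fold_eq _ 0 0 le_rfl le_rfl
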